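-- pv_equiv track=rewrite | github.com/miliar/Code_Jam_Webscraper | solutions_python/solutions_year16_round0_nr4/1399.py | check
-- ===== SOURCE A (Python) =====
-- def check(K, C, S):
--     if (C==1 and K>S) or (K > 2*S):
--         return "IMPOSSIBLE"
--     result = ''
--     if (C == 1):
--         for i in range(1, K+1):
--             result += ' '+str(i)
--     else:
--         last = 0
--         cleared = 0
--         step = K**(C-1)
--         stepp = K**(C-2)
--         while cleared < K:
--             result += ' '+str(min(last+(cleared+2)*stepp, K**C))
--             last += 2*step
--             cleared += 2
--     return result[1:]
-- ===== SOURCE B (Python) =====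
-- def _pairs(ts):
--     # chunk the tile list into pairs; an odd leftover tile is paired with itself
--     out = []
--     while len(ts) >= 2:
--         out.append((ts[0], ts[1]))
--         ts = ts[2:]
--     if ts:
--         out.append((ts[0], ts[0]))
--     return out
--
--
-- def check(K, C, S):
--     if (C == 1 and K > S) or K > 2 * S:
--         return "IMPOSSIBLE"
--     if C == 1:
--         return ' '.join(map(str, range(1, K + 1)))
--     # one guess per pair (a, b) of base tiles: the tile whose first art digit is a
--     # and second art digit is b, i.e. position (a-1)*K^(C-1) + b*K^(C-2); no cap needed
--     P = K ** (C - 2)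
--     return ' '.join(str((a - 1) * K * P + b * P) for a, b in _pairs(list(range(1, K + 1))))
-- ===== Notes on version B (the rewrite author's own statement) =====
-- stated objective: alternative
-- what changed: Instead of A's while-loop accumulating (last, cleared) and capping each term with min(.., K**C), B chunks the tile list range(1,K+1) into pairs (odd leftover paired with itself) and encodes each pair (a,b) directly as the position (a-1)*K**(C-1)+b*K**(C-2), with no cap and no running state, joined with ' '.join.
-- outside the precondition, e.g. on check(5, 0, 8): A returns '0.08 0.56 1', B returns '0.08 0.56 1.0'; on check(2, 0, 5): A returns '0.5', B returns '0.5'; on check(0, 0, 5): A raises ZeroDivisionError, B raises ZeroDivisionError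
import Mathlib
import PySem

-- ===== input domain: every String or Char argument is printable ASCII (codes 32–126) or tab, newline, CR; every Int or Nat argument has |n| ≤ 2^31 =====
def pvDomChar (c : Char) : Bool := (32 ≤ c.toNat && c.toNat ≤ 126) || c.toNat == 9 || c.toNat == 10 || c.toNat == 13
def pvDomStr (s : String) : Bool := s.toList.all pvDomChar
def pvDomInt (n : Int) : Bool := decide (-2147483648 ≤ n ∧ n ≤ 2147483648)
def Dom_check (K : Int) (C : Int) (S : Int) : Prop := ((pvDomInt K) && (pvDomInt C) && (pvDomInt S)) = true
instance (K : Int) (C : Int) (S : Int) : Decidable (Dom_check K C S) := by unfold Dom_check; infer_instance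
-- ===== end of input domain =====

-- B replaces A's while-loop with running accumulators and a min-cap by chunking the tile
-- list into pairs and encoding each pair directly as a position (objective: alternative).

-- ===== PORT A =====
-- the while loop: state (last, cleared, result); result kept as the code-point list of the Python string
def checkLoop (K step stepp KC : Int) (last cleared : Int) (result : List Char) : List Char :=
  if _h : cleared < K then
    checkLoop K step stepp KC (last + 2 * step) (cleared + 2)
      (result ++ (' ' :: PySem.Int.toChars (min (last + (cleared + 2) * stepp) KC)))
  else result
termination_by (K - cleared).toNat
decreasing_by omega

def check (K : Int) (C : Int) (S : Int) : String :=
  if (C == 1 && decide (K > S)) || decide (K > 2 * S) then "IMPOSSIBLE"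
  else
    let result : List Char :=
      if C == 1 then
        (PySem.List.pyRange 1 (K + 1) 1).foldl
          (fun r i => r ++ (' ' :: PySem.Int.toChars i)) []
      else
        -- K**(C-1) etc.: exact for the admitted inputs (Pre_check gives C ≥ 1, so C ≥ 2 here)
        checkLoop K (K ^ (C - 1).toNat) (K ^ (C - 2).toNat) (K ^ C.toNat) 0 0 []
    String.ofList (PySem.List.slice result (some 1) none)   -- result[1:]

-- ===== PORT B =====
-- Source B's _pairs: consume the list two at a time; an odd leftover tile is paired with itself
def pairUp : List Int → List (Int × Int)
  | a :: b :: rest => (a, b) :: pairUp rest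
  | [a] => [(a, a)]
  | [] => []

def check_alt (K : Int) (C : Int) (S : Int) : String :=
  if (C == 1 && decide (K > S)) || decide (K > 2 * S) then "IMPOSSIBLE"
  else if C == 1 then
    String.ofList (PySem.Chars.join [' ']
      ((PySem.List.pyRange 1 (K + 1) 1).map PySem.Int.toChars))
  else
    -- P = K**(C-2); pair (a, b) ↦ (a-1)*K*P + b*P
    String.ofList (PySem.Chars.join [' ']
      ((pairUp (PySem.List.pyRange 1 (K + 1) 1)).map (fun p =>
        PySem.Int.toChars ((p.1 - 1) * K * K ^ (C - 2).toNat + p.2 * K ^ (C - 2).toNat))))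

-- ===== PRECONDITION & SPEC =====
-- Pre_ excludes C ≤ 0 with K ≥ 0 (outside the puzzle's domain C ≥ 1): there Python
-- evaluates K**(C-1) in float arithmetic that reaches the output as a float-formatted
-- string such as '0.5' (unrepresentable under the int convention), or raises
-- ZeroDivisionError for K = 0.
def Pre_check (K : Int) (C : Int) (S : Int) : Prop := 1 ≤ C ∨ K < 0
instance (K : Int) (C : Int) (S : Int) : Decidable (Pre_check K C S) := by unfold Pre_check; infer_instance
def pvWitness_check : Int × Int × Int := (4, 2, 3)

def Spec_check (K : Int) (C : Int) (S : Int) (out : String) : Prop := out = check_alt K C S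
instance (K : Int) (C : Int) (S : Int) (out : String) : Decidable (Spec_check K C S out) := by unfold Spec_check; infer_instance

-- ===== CLAIM (what is proved, stated in full; the proofs are below) =====
def Claim_equal_check : Prop := ∀ (K : Int) (C : Int) (S : Int), Dom_check K C S → Pre_check K C S → Spec_check K C S (check K C S)

-- ===== LEMMAS AND PROOFS =====

-- the flattened " x" pieces, with the leading space dropped, are the ' '-join of the pieces
lemma flatten_space_cons {α : Type} (g : α → List Char) (xs : List α) :
    ((xs.map (fun i => ' ' :: g i)).flatten).tail
      = PySem.Chars.join [' '] (xs.map g) := by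
  induction xs with
  | nil => simp [PySem.Chars.join_nil]
  | cons x xs ih =>
    cases xs with
    | nil =>
      simp only [List.map_cons, List.map_nil, List.flatten_cons, List.flatten_nil,
        List.append_nil, List.tail_cons]
      rw [PySem.Chars.join_singleton]
    | cons y ys =>
      simp only [List.map_cons, List.flatten_cons, List.cons_append, List.tail_cons] at ih ⊢
      rw [PySem.Chars.join_cons_cons, ← ih]
      simp

lemma checkLoop_eq (K step stepp KC : Int) :
    ∀ n j result, (PySem.Int.floordiv (K + 1) 2 - j).toNat = n →
    checkLoop K step stepp KC (2 * j * step) (2 * j) result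
      = result ++ ((PySem.List.pyRange j (PySem.Int.floordiv (K + 1) 2) 1).map
          (fun i => ' ' :: PySem.Int.toChars (min (2 * i * step + (2 * i + 2) * stepp) KC))).flatten := by
  have hm : ∀ j : Int, (2 * j < K) ↔ j < PySem.Int.floordiv (K + 1) 2 := by
    intro j
    constructor
    · intro h
      have h2 : (j + 1) * 2 ≤ K + 1 := by omega
      have := (PySem.Int.le_floordiv_iff_mul_le (a := K + 1) (b := 2) (q := j + 1) (by omega)).2 h2
      omega
    · intro h
      have h2 : (j + 1) ≤ PySem.Int.floordiv (K + 1) 2 := by omega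
      have := (PySem.Int.le_floordiv_iff_mul_le (a := K + 1) (b := 2) (q := j + 1) (by omega)).1 h2
      omega
  intro n
  induction n with
  | zero =>
    intro j result h0
    have hge : PySem.Int.floordiv (K + 1) 2 ≤ j := by omega
    have hnot : ¬ 2 * j < K := by
      intro h; exact absurd ((hm j).1 h) (by omega)
    rw [checkLoop, PySem.List.pyRange_one_eq_nil hge]
    simp [hnot]
  | succ n ih =>
    intro j result h0
    by_cases hlt : 2 * j < K
    · have hj : j < PySem.Int.floordiv (K + 1) 2 := (hm j).1 hlt
      rw [checkLoop]
      simp only [hlt, dif_pos]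
      rw [PySem.List.pyRange_one_cons hj]
      simp only [List.map_cons, List.flatten_cons]
      rw [show (2 * j * step + 2 * step : Int) = 2 * (j + 1) * step from by ring,
          show (2 * j + 2 : Int) = 2 * (j + 1) from by ring,
          ih (j + 1) _ (by omega)]
      simp [List.append_assoc]
    · have hge : PySem.Int.floordiv (K + 1) 2 ≤ j := by
        by_contra h; exact hlt ((hm j).2 (by omega))
      rw [checkLoop, PySem.List.pyRange_one_eq_nil hge]
      simp [hlt]

-- pairUp on a range of consecutive integers, in closed form
lemma pairUp_pyRange : ∀ (n : Nat) (a b : Int), (b - a).toNat = n →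
    pairUp (PySem.List.pyRange a b 1)
      = (PySem.List.pyRange 0 (PySem.Int.floordiv (b - a + 1) 2) 1).map
          (fun j => (a + 2 * j, min (a + 2 * j + 1) (b - 1))) := by
  intro n
  induction n using Nat.strong_induction_on with
  | _ n ih =>
    intro a b hn
    have hfd : PySem.Int.floordiv (b - a + 1) 2 = (b - a + 1) / 2 :=
      PySem.Int.floordiv_eq_ediv_of_pos (by norm_num)
    by_cases h1 : b ≤ a
    · rw [PySem.List.pyRange_one_eq_nil h1, hfd, PySem.List.pyRange_one_eq_nil (by omega)]
      simp [pairUp]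
    · by_cases h2 : b ≤ a + 1
      · have hb : b = a + 1 := by omega
        subst hb
        rw [PySem.List.pyRange_one_cons (by omega), PySem.List.pyRange_one_eq_nil (by omega),
            hfd, show (a + 1 - a + 1) / 2 = (1 : Int) from by omega,
            PySem.List.pyRange_one_cons (by omega), PySem.List.pyRange_one_eq_nil (by omega)]
        simp only [pairUp, List.map_cons, List.map_nil, List.cons.injEq, Prod.mk.injEq]
        exact ⟨⟨by omega, by omega⟩, trivial⟩
      · rw [PySem.List.pyRange_one_cons (show a < b by omega),
            PySem.List.pyRange_one_cons (show a + 1 < b by omega)]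
        show (a, a + 1) :: pairUp (PySem.List.pyRange (a + 1 + 1) b 1) = _
        rw [show (a + 1 + 1 : Int) = a + 2 from by ring,
            ih (n - 2) (by omega) (a + 2) b (by omega)]
        have hfd2 : PySem.Int.floordiv (b - (a + 2) + 1) 2 = (b - (a + 2) + 1) / 2 :=
          PySem.Int.floordiv_eq_ediv_of_pos (by norm_num)
        rw [hfd, hfd2,
            PySem.List.pyRange_one_cons (show (0 : Int) < (b - a + 1) / 2 by omega),
            PySem.List.pyRange_one, PySem.List.pyRange_one]
        simp only [List.map_cons, List.map_map]
        refine List.cons_eq_cons.mpr ⟨?_, ?_⟩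
        · simp only [Prod.mk.injEq]
          constructor <;> omega
        · rw [show ((b - (a + 2) + 1) / 2 - 0).toNat = ((b - a + 1) / 2 - (0 + 1)).toNat from by omega]
          apply List.map_congr_left
          intro k _
          simp only [Function.comp_apply, Prod.mk.injEq]
          constructor <;> omega

-- ===== VERDICT (by name: the statement is the Claim_ definition above) =====
theorem check_spec : Claim_equal_check := by
  intro K C S _ hpre
  unfold Spec_check check check_alt
  by_cases hg : ((C == 1 && decide (K > S)) || decide (K > 2 * S)) = true
  · simp [hg]
  · simp only [hg, Bool.false_eq_true, if_false]
    by_cases hc : (C == 1) = true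
    · simp only [hc, if_true]
      rw [PySem.List.foldl_append_eq_flatMap, List.flatMap_def, List.nil_append,
          PySem.List.slice_from_one, flatten_space_cons PySem.Int.toChars]
    · simp only [hc, Bool.false_eq_true, if_false]
      have hl := checkLoop_eq K (K ^ (C - 1).toNat) (K ^ (C - 2).toNat) (K ^ C.toNat)
        ((PySem.Int.floordiv (K + 1) 2 - 0).toNat) 0 [] rfl
      simp only [mul_zero, zero_mul, List.nil_append] at hl
      rw [hl, PySem.List.slice_from_one,
          flatten_space_cons (fun i => PySem.Int.toChars
            (min (2 * i * K ^ (C - 1).toNat + (2 * i + 2) * K ^ (C - 2).toNat) (K ^ C.toNat)))]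
      rw [pairUp_pyRange (K + 1 - 1).toNat 1 (K + 1) rfl,
          show (K + 1 - 1 + 1 : Int) = K + 1 from by ring, List.map_map]
      congr 1
      congr 1
      apply List.map_congr_left
      intro j hj
      have hjm := (PySem.List.mem_pyRange_one).1 hj
      have hfd : PySem.Int.floordiv (K + 1) 2 = (K + 1) / 2 :=
        PySem.Int.floordiv_eq_ediv_of_pos (by norm_num)
      rw [hfd] at hjm
      have hj0 : 0 ≤ j := hjm.1
      have hK1 : 1 ≤ K := by omega
      have hC2 : 2 ≤ C := by
        rcases hpre with h | h
        · have : ¬ C = 1 := by intro he; exact hc (by simp [he])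
          omega
        · omega
      simp only [Function.comp_apply]
      congr 1
      have e1 : (C - 1).toNat = (C - 2).toNat + 1 := by omega
      have e2 : C.toNat = (C - 2).toNat + 2 := by omega
      rw [e1, e2, pow_succ, pow_succ, pow_succ]
      have hp : (1 : Int) ≤ K ^ (C - 2).toNat := one_le_pow₀ hK1
      set p : Int := K ^ (C - 2).toNat with hpdef
      by_cases hle : 2 * j + 2 ≤ K
      · have hmin1 : min (1 + 2 * j + 1) (K + 1 - 1) = 2 * j + 2 := by omega
        have hq : 2 * j * K + (2 * j + 2) ≤ K * K := by nlinarith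
        have hmin2 : 2 * j * (p * K) + (2 * j + 2) * p ≤ p * K * K := by nlinarith
        rw [hmin1, min_eq_left hmin2]
        ring
      · have hK2j : K = 2 * j + 1 := by omega
        have hmin1 : min (1 + 2 * j + 1) (K + 1 - 1) = K := by omega
        have hmin2 : p * K * K ≤ 2 * j * (p * K) + (2 * j + 2) * p := by
          rw [hK2j]
          nlinarith [mul_le_mul_of_nonneg_left
            (show (4 * j ^ 2 + 4 * j + 1 : Int) ≤ 4 * j ^ 2 + 4 * j + 2 from by omega)
            (show (0 : Int) ≤ p from by omega)]
        rw [hmin1, min_eq_right hmin2, hK2j]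
        ring
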